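-- pv_equiv track=rewrite | github.com/miliar/Code_Jam_Webscraper | solutions_python/Problem_118/48.py | dfs
-- ===== SOURCE A (Python) =====
-- def dfs(s, v, m):
--     if m == 2:
--         v -= 2 * int(s) ** 2
--         if v < 0:
--             r = []
--         else:
--             r = [s + s]
--         return r
--     elif m == 1:
--         v -= int(s) ** 2
--         if v < 0:
--             return []
--         else:
--             return [s]
--     else:
--         v -= 2 * int(s) ** 2
--         if v < 0:
--             return []
--         r = []
--         r.extend(map(lambda t: s + t + s, dfs('0', v, m - 2)))
--         r.extend(map(lambda t: s + t + s, dfs('1', v, m - 2)))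
--         r.extend(map(lambda t: s + t + s, dfs('2', v, m - 2)))
--         r.extend(map(lambda t: s + t + s, dfs('3', v, m - 2)))
--         return r[:]
-- ===== SOURCE B (Python) =====
-- def dfs(s, v, m):
--     # Iterative breadth-first construction: instead of A's depth-first recursion that
--     # wraps each inner result at every level, keep a worklist of (inner digits, remaining
--     # budget) pairs, expand it level by level, and emit each palindrome once at the end.
--     outer = int(s)
--     if m == 1:
--         return [s] if outer * outer <= v else []
--     b = v - 2 * outer * outer
--     if b < 0:
--         return []
--     if m == 2:
--         return [s + s]
--     states = [("", b)]
--     for _ in range((m - 3) // 2):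
--         states = [(mid + str(c), rem - 2 * c * c)
--                   for (mid, rem) in states
--                   for c in range(4) if rem - 2 * c * c >= 0]
--     odd = m % 2 == 1
--     out = []
--     for (mid, rem) in states:
--         for c in range(4):
--             w = c * c if odd else 2 * c * c
--             if rem >= w:
--                 center = str(c) if odd else str(c) + str(c)
--                 out.append(s + mid + center + mid[::-1] + s)
--     return out
-- ===== Notes on version B (the rewrite author's own statement) =====
-- stated objective: alternative
-- what changed: A's depth-first recursion on m (four recursive calls per level, each inner result list re-wrapped with s+t+s at every level) is replaced by an iterative breadth-first worklist of (inner-digit string, remaining budget) pairs expanded level by level, with each palindrome string assembled once (prefix + center + mirrored prefix) at the end.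
import Mathlib
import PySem

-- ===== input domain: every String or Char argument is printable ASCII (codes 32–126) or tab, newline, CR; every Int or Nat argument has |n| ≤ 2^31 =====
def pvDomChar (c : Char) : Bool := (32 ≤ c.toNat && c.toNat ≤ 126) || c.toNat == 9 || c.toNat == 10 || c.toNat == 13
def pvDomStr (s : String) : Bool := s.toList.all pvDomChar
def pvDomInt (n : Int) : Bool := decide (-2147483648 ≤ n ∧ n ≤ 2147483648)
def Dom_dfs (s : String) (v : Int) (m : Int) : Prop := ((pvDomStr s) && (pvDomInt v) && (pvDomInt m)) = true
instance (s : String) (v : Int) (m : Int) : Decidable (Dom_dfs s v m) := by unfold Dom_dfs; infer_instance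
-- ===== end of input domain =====

-- B replaces A's depth-first recursion (which wraps every inner result at each level)
-- by an iterative breadth-first worklist of (inner digits, remaining budget) pairs,
-- emitting each palindrome once at the end (objective: alternative).

-- ===== PORT A =====
-- int(s), defined where Pre_dfs holds (ofStr? = some)
def pyIntOf (s : String) : Int := (PySem.Int.ofStr? s).getD 0

-- A recurses on m - 2; fuel makes the recursion structural. Under Pre_dfs (1 ≤ m)
-- the fuel m.toNat is never exhausted, so the `0 => []` guard is unreachable.
def dfsAux : Nat → String → Int → Int → List String
  | fuel, s, v, m =>
    if m = 2 then
      let v2 := v - 2 * pyIntOf s ^ 2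
      if v2 < 0 then [] else [s ++ s]
    else if m = 1 then
      let v2 := v - pyIntOf s ^ 2
      if v2 < 0 then [] else [s]
    else
      match fuel with
      | 0 => []
      | Nat.succ f =>
        let v2 := v - 2 * pyIntOf s ^ 2
        if v2 < 0 then []
        else
          ((dfsAux f "0" v2 (m - 2)).map (fun t => s ++ t ++ s)) ++
          ((dfsAux f "1" v2 (m - 2)).map (fun t => s ++ t ++ s)) ++
          ((dfsAux f "2" v2 (m - 2)).map (fun t => s ++ t ++ s)) ++
          ((dfsAux f "3" v2 (m - 2)).map (fun t => s ++ t ++ s))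

def dfs (s : String) (v : Int) (m : Int) : List String := dfsAux m.toNat s v m

-- ===== PORT B =====
-- one pass of Source B's worklist comprehension: expand every state by the four digits,
-- keeping those whose remaining budget stays nonnegative
def levelOnce (states : List (String × Int)) : List (String × Int) :=
  states.flatMap (fun st =>
    ((PySem.List.pyRange 0 4 1).filter (fun c => decide (st.2 - 2 * c * c ≥ 0))).map
      (fun c => (st.1 ++ PySem.Int.toStr c, st.2 - 2 * c * c)))

-- Source B's `for _ in range((m - 3) // 2)` loop
def levelIter : Nat → List (String × Int) → List (String × Int)
  | 0, states => states
  | Nat.succ j, states => levelIter j (levelOnce states)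

-- Source B's `range((m - 3) // 2)` is ported via .toNat: for m ≥ 3 the two agree, and for
-- m < 3 both give an empty loop
def dfs_alt (s : String) (v : Int) (m : Int) : List String :=
  let outer := pyIntOf s
  if m = 1 then (if outer * outer ≤ v then [s] else []) else
  let b := v - 2 * outer * outer
  if b < 0 then [] else
  if m = 2 then [s ++ s] else
  let states := levelIter (PySem.Int.floordiv (m - 3) 2).toNat [("", b)]
  let odd : Bool := PySem.Int.mod m 2 == 1
  states.foldl (fun out st =>
    (PySem.List.pyRange 0 4 1).foldl (fun out c =>
      let w := if odd then c * c else 2 * c * c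
      if w ≤ st.2 then
        let center := if odd then PySem.Int.toStr c
                      else PySem.Int.toStr c ++ PySem.Int.toStr c
        out ++ [s ++ st.1 ++ center ++ (PySem.Str.slice? st.1 none none (-1)).getD "" ++ s]
      else out) out) []


-- ===== PRECONDITION & SPEC =====
-- Pre_dfs: int(s) must parse (otherwise A raises ValueError), and either 1 ≤ m or the
-- budget is already negative (for m ≤ 0 with nonnegative remaining budget A recurses
-- on m-2 forever: RecursionError).
def Pre_dfs (s : String) (v : Int) (m : Int) : Prop :=
  (1 ≤ m ∨ v - 2 * ((PySem.Int.ofStr? s).getD 0) ^ 2 < 0) ∧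
    (PySem.Int.ofStr? s).isSome = true
instance (s : String) (v : Int) (m : Int) : Decidable (Pre_dfs s v m) := by
  unfold Pre_dfs; infer_instance

def pvWitness_dfs : String × Int × Int := ("1", 30, 5)

def Spec_dfs (s : String) (v : Int) (m : Int) (out : List String) : Prop := out = dfs_alt s v m
instance (s : String) (v : Int) (m : Int) (out : List String) : Decidable (Spec_dfs s v m out) := by unfold Spec_dfs; infer_instance

-- ===== CLAIM (what is proved, stated in full; the proofs are below) =====
def Claim_equal_dfs : Prop := ∀ (s : String) (v : Int) (m : Int), Dom_dfs s v m → Pre_dfs s v m → Spec_dfs s v m (dfs s v m)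

-- ===== LEMMAS AND PROOFS =====

-- proof-side helpers
-- ghost base-4 decoder (big-endian digit list of a code)
def decodeLoop : Nat → Int → List Int
  | 0, _ => []
  | Nat.succ k, c => PySem.Int.mod c 4 :: decodeLoop k (PySem.Int.floordiv c 4)

def digitsOf (nn : Nat) (code : Int) : List Int := (decodeLoop nn code).reverse

def wOf (odd : Bool) (o : Int) (ds : List Int) : Int :=
  let w0 := 2 * o * o + (ds.map (fun d => 2 * d * d)).sum
  if odd then w0 - (PySem.List.pyGet? ds (-1)).getD 0 * (PySem.List.pyGet? ds (-1)).getD 0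
  else w0

def strOf (odd : Bool) (s : String) (ds : List Int) : String :=
  let mid := PySem.Str.join "" (ds.map PySem.Int.toStr)
  let strip := if odd then PySem.Str.slice mid none (some (-1)) else mid
  s ++ mid ++ (PySem.Str.slice? strip none none (-1)).getD "" ++ s


-- ghost reference: the flat filter/map characterisation both ports are related to
def flatRef (s : String) (v : Int) (m : Int) : List String :=
  if m = 1 then (if pyIntOf s * pyIntOf s ≤ v then [s] else []) else
    ((PySem.List.pyRange 0 ((4 : Int) ^ (PySem.Int.floordiv (m - 1) 2).toNat) 1).filter
        (fun code => decide (wOf (PySem.Int.mod m 2 == 1) (pyIntOf s)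
            (digitsOf (PySem.Int.floordiv (m - 1) 2).toNat code) ≤ v))).map
      (fun code => strOf (PySem.Int.mod m 2 == 1) s
          (digitsOf (PySem.Int.floordiv (m - 1) 2).toNat code))

theorem altNF (s : String) (v m : Int) (h : ¬ m = 1) :
    flatRef s v m =
      ((PySem.List.pyRange 0 ((4 : Int) ^ (PySem.Int.floordiv (m - 1) 2).toNat) 1).filter
          (fun code => decide (wOf (PySem.Int.mod m 2 == 1) (pyIntOf s)
              (digitsOf (PySem.Int.floordiv (m - 1) 2).toNat code) ≤ v))).map
        (fun code => strOf (PySem.Int.mod m 2 == 1) s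
            (digitsOf (PySem.Int.floordiv (m - 1) 2).toNat code)) := by
  unfold flatRef
  rw [if_neg h]

theorem pyGet_neg_one (ds : List Int) : PySem.List.pyGet? ds (-1) = ds.getLast? := by
  cases ds with
  | nil => simp [PySem.List.pyGet?, PySem.List.pyIdx?]
  | cons a t =>
    simp only [PySem.List.pyGet?, PySem.List.pyIdx?]
    norm_num
    rw [List.getLast?_eq_getElem?]
    simp

theorem wOf_ge (odd : Bool) (o : Int) (ds : List Int) : 2 * o * o ≤ wOf odd o ds := by
  have hsum : ∀ x ∈ ds.map (fun d => 2 * d * d), 0 ≤ x := by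
    intro x hx
    simp only [List.mem_map] at hx
    obtain ⟨d, _, rfl⟩ := hx
    nlinarith [mul_self_nonneg d]
  have h0 : 0 ≤ (ds.map (fun d => 2 * d * d)).sum := List.sum_nonneg hsum
  unfold wOf
  cases odd with
  | false => simp; omega
  | true =>
    simp only [pyGet_neg_one]
    cases hl : ds.getLast? with
    | none => simp; omega
    | some c =>
      have hmem : c ∈ ds := List.mem_of_getLast? hl
      have : 2 * c * c ∈ ds.map (fun d => 2 * d * d) := List.mem_map_of_mem hmem
      have hle : 2 * c * c ≤ (ds.map (fun d => 2 * d * d)).sum :=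
        List.single_le_sum hsum _ this
      simp only [Option.getD_some, if_true]
      have := mul_self_nonneg c
      linarith
      

theorem wOf_cons (odd : Bool) (o q : Int) (ds : List Int) (h : ds ≠ [] ∨ odd = false) :
    wOf odd o (q :: ds) = 2 * o * o + wOf odd q ds := by
  unfold wOf
  cases odd with
  | false => simp
  | true =>
    rcases h with h | h
    · have hlast : (q :: ds).getLast? = ds.getLast? := by
        cases ds with
        | nil => simp at h
        | cons b t => simp [List.getLast?_cons_cons]
      simp only [pyGet_neg_one, hlast, List.map_cons, List.sum_cons, if_true]
      ring
    · simp at h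


def charOf (d : Int) : Char := Char.ofNat (48 + d.toNat)

theorem toChars_digit (d : Int) (h0 : 0 ≤ d) (h4 : d < 4) :
    PySem.Int.toChars d = [charOf d] := by
  interval_cases d <;> decide

theorem midList (ds : List Int) (h : ∀ d ∈ ds, 0 ≤ d ∧ d < 4) :
    (PySem.Str.join "" (ds.map PySem.Int.toStr)).toList = ds.map charOf := by
  rw [PySem.Str.toList_join]
  have e : (ds.map PySem.Int.toStr).map String.toList = (ds.map charOf).map (fun c => [c]) := by
    rw [List.map_map, List.map_map]
    apply List.map_congr_left
    intro d hd
    simp [toChars_digit d (h d hd).1 (h d hd).2]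
  rw [e]
  simpa using PySem.Chars.join_nil_singletons (ds.map charOf)

theorem strOf_nil (s : String) : strOf false s [] = s ++ s := by
  apply String.toList_inj.mp
  unfold strOf
  simp only [Bool.false_eq_true, if_false, PySem.Str.slice?_none_none_neg_one,
    Option.getD_some, String.toList_append, String.toList_ofList]
  rw [midList [] (by simp)]
  simp

theorem strOf_single (s sq : String) (q : Int) (h0 : 0 ≤ q) (h4 : q < 4)
    (htos : PySem.Int.toStr q = sq) : strOf true s [q] = s ++ sq ++ s := by
  apply String.toList_inj.mp
  have hsq : sq.toList = [charOf q] := by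
    rw [← htos, PySem.Int.toList_toStr]
    exact toChars_digit q h0 h4
  unfold strOf
  simp only [if_true, PySem.Str.slice?_none_none_neg_one, Option.getD_some,
    String.toList_append, String.toList_ofList, PySem.Str.toList_slice]
  rw [PySem.Chars.slice_eq_listSlice, midList [q] (by simpa using ⟨h0, h4⟩),
    PySem.List.slice_to_neg_one]
  simp [hsq]

theorem strOf_cons (odd : Bool) (s sq : String) (q : Int) (ds : List Int)
    (hds : ∀ d ∈ ds, 0 ≤ d ∧ d < 4) (hq0 : 0 ≤ q) (hq4 : q < 4)
    (hodd : odd = true → ds ≠ []) (htos : PySem.Int.toStr q = sq) :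
    strOf odd s (q :: ds) = s ++ strOf odd sq ds ++ s := by
  apply String.toList_inj.mp
  have hsq : sq.toList = [charOf q] := by
    rw [← htos, PySem.Int.toList_toStr]
    exact toChars_digit q hq0 hq4
  have hall : ∀ d ∈ q :: ds, 0 ≤ d ∧ d < 4 := by
    intro d hd
    rcases List.mem_cons.mp hd with rfl | hd
    · exact ⟨hq0, hq4⟩
    · exact hds d hd
  unfold strOf
  cases odd with
  | false =>
    simp only [Bool.false_eq_true, if_false, PySem.Str.slice?_none_none_neg_one,
      Option.getD_some, String.toList_append, String.toList_ofList]
    rw [midList ds hds, midList (q :: ds) hall]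
    simp [hsq]
  | true =>
    have hne : ds ≠ [] := hodd rfl
    have hne' : ds.map charOf ≠ [] := by simpa using hne
    simp only [if_true, PySem.Str.slice?_none_none_neg_one, Option.getD_some,
      String.toList_append, String.toList_ofList, PySem.Str.toList_slice]
    rw [PySem.Chars.slice_eq_listSlice, PySem.Chars.slice_eq_listSlice,
      midList ds hds, midList (q :: ds) hall, PySem.List.slice_to_neg_one,
      PySem.List.slice_to_neg_one, List.map_cons,
      List.dropLast_cons_of_ne_nil hne']
    simp [hsq]



theorem decode_split (k : Nat) (q r : Int) (hq0 : 0 ≤ q) (hq4 : q < 4)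
    (hr0 : 0 ≤ r) (hrK : r < 4 ^ k) :
    decodeLoop (k + 1) (q * 4 ^ k + r) = decodeLoop k r ++ [q] := by
  induction k generalizing r with
  | zero =>
    have : r = 0 := by omega
    subst this
    simp [decodeLoop]
    omega
  | succ k ih =>
    have hK : (0 : Int) < 4 ^ k := by positivity
    have e : q * 4 ^ (k + 1) + r = 4 * (q * 4 ^ k) + r := by ring
    have hmod : PySem.Int.mod (q * 4 ^ (k + 1) + r) 4 = PySem.Int.mod r 4 := by
      rw [PySem.Int.mod_eq_emod_of_pos (by norm_num), PySem.Int.mod_eq_emod_of_pos (by norm_num), e]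
      generalize q * 4 ^ k = t
      omega
    have hdiv : PySem.Int.floordiv (q * 4 ^ (k + 1) + r) 4 = q * 4 ^ k + PySem.Int.floordiv r 4 := by
      rw [PySem.Int.floordiv_eq_ediv_of_pos (by norm_num), PySem.Int.floordiv_eq_ediv_of_pos (by norm_num), e]
      generalize q * 4 ^ k = t
      omega
    have hrb : 0 ≤ PySem.Int.floordiv r 4 ∧ PySem.Int.floordiv r 4 < 4 ^ k := by
      rw [PySem.Int.floordiv_eq_ediv_of_pos (by norm_num)]
      have : r < 4 * 4 ^ k := by
        have h4 : (4 : Int) ^ (k + 1) = 4 * 4 ^ k := by ring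
        omega
      constructor
      · positivity
      · omega
    show PySem.Int.mod _ 4 :: decodeLoop (k + 1) (PySem.Int.floordiv _ 4) =
      (PySem.Int.mod r 4 :: decodeLoop k (PySem.Int.floordiv r 4)) ++ [q]
    rw [hmod, hdiv, ih _ hrb.1 hrb.2]
    simp

theorem decode_mem (k : Nat) (c : Int) : ∀ d ∈ decodeLoop k c, 0 ≤ d ∧ d < 4 := by
  induction k generalizing c with
  | zero => simp [decodeLoop]
  | succ k ih =>
    intro d hd
    simp only [decodeLoop, List.mem_cons] at hd
    rcases hd with h | h
    · subst h
      exact ⟨PySem.Int.mod_nonneg _ (by norm_num), PySem.Int.mod_lt _ (by norm_num)⟩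
    · exact ih _ d h

theorem decode_len (k : Nat) (c : Int) : (decodeLoop k c).length = k := by
  induction k generalizing c with
  | zero => rfl
  | succ k ih => simp [decodeLoop, ih]

theorem digitsOf_len (k : Nat) (c : Int) : (digitsOf k c).length = k := by
  simp [digitsOf, decode_len]

theorem digitsOf_mem (k : Nat) (c : Int) : ∀ d ∈ digitsOf k c, 0 ≤ d ∧ d < 4 := by
  intro d hd
  exact decode_mem k c d (List.mem_reverse.mp hd)

theorem digitsOf_split (k : Nat) (q r : Int) (hq0 : 0 ≤ q) (hq4 : q < 4)
    (hr0 : 0 ≤ r) (hrK : r < 4 ^ k) :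
    digitsOf (k + 1) (q * 4 ^ k + r) = q :: digitsOf k r := by
  unfold digitsOf
  rw [decode_split k q r hq0 hq4 hr0 hrK, List.reverse_append]
  rfl



theorem pyRange_shift (c K : Int) :
    PySem.List.pyRange c (c + K) 1 = (PySem.List.pyRange 0 K 1).map (fun r => c + r) := by
  rw [PySem.List.pyRange_one, PySem.List.pyRange_one, List.map_map]
  simp

theorem range_base4 (k : Nat) :
    PySem.List.pyRange 0 ((4 : Int) ^ (k + 1)) 1 =
      ([0, 1, 2, 3] : List Int).flatMap
        (fun q => (PySem.List.pyRange 0 ((4 : Int) ^ k) 1).map (fun r => q * 4 ^ k + r)) := by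
  have hK : (0 : Int) < 4 ^ k := by positivity
  have e : (4 : Int) ^ (k + 1) = 4 ^ k + (4 ^ k + (4 ^ k + 4 ^ k)) := by ring
  rw [e]
  rw [PySem.List.pyRange_one_append 0 (4 ^ k) _ (by omega) (by omega)]
  rw [PySem.List.pyRange_one_append (4 ^ k) (4 ^ k + 4 ^ k) _ (by omega) (by omega)]
  rw [PySem.List.pyRange_one_append (4 ^ k + 4 ^ k) (4 ^ k + 4 ^ k + 4 ^ k) _ (by omega) (by omega)]
  have s0 : PySem.List.pyRange 0 ((4:Int) ^ k) 1 = (PySem.List.pyRange 0 ((4:Int) ^ k) 1).map (fun r => 0 * 4 ^ k + r) := by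
    simp
  have s1 : PySem.List.pyRange ((4:Int) ^ k) (4 ^ k + 4 ^ k) 1 = (PySem.List.pyRange 0 ((4:Int) ^ k) 1).map (fun r => 1 * 4 ^ k + r) := by
    rw [← pyRange_shift]; ring_nf
  have s2 : PySem.List.pyRange ((4:Int) ^ k + 4 ^ k) (4 ^ k + 4 ^ k + 4 ^ k) 1 = (PySem.List.pyRange 0 ((4:Int) ^ k) 1).map (fun r => 2 * 4 ^ k + r) := by
    rw [← pyRange_shift]; ring_nf
  have s3 : PySem.List.pyRange ((4:Int) ^ k + 4 ^ k + 4 ^ k) (4 ^ k + (4 ^ k + (4 ^ k + 4 ^ k))) 1 = (PySem.List.pyRange 0 ((4:Int) ^ k) 1).map (fun r => 3 * 4 ^ k + r) := by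
    rw [← pyRange_shift]; ring_nf
  rw [s1, s2, s3]
  conv_lhs => rw [s0]
  simp [List.flatMap_cons]

theorem chunk_eq (s sq : String) (q o v v2 m : Int) (k : Nat)
    (hq0 : 0 ≤ q) (hq4 : q < 4) (htos : PySem.Int.toStr q = sq)
    (hparse : pyIntOf sq = q) (h3 : 3 ≤ m)
    (hk : ((m - 3) / 2).toNat = k) (hv2 : v2 = v - 2 * o * o) :
    (((PySem.List.pyRange 0 ((4 : Int) ^ k) 1).map (fun r => q * 4 ^ k + r)).filter
        (fun code => decide (wOf (PySem.Int.mod m 2 == 1) o (digitsOf (k + 1) code) ≤ v))).map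
      (fun code => strOf (PySem.Int.mod m 2 == 1) s (digitsOf (k + 1) code)) =
    (flatRef sq v2 (m - 2)).map (fun t => s ++ t ++ s) := by
  have hoddm : (PySem.Int.mod m 2 == 1) = (PySem.Int.mod (m - 2) 2 == 1) := by
    rw [PySem.Int.mod_eq_emod_of_pos (by norm_num), PySem.Int.mod_eq_emod_of_pos (by norm_num)]
    have : m % 2 = (m - 2) % 2 := by omega
    rw [this]
  rcases eq_or_lt_of_le h3 with h3' | h4
  · -- m = 3
    have hm : m = 3 := h3'.symm
    subst hm
    have hk0 : k = 0 := by omega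
    subst hk0
    have hodd3 : (PySem.Int.mod 3 2 == 1) = true := by decide
    have hq : q * 4 ^ 0 + 0 = q := by ring
    have hrange : PySem.List.pyRange 0 ((4 : Int) ^ 0) 1 = [0] := by decide
    have hdig : digitsOf (0 + 1) q = [q] := by
      unfold digitsOf decodeLoop
      rw [PySem.Int.mod_eq_emod_of_pos (by norm_num)]
      have hqq : q % 4 = q := by omega
      rw [hqq]
      rfl
    have hw : wOf true o [q] = 2 * o * o + (2 * q * q + 0) - q * q := by
      unfold wOf
      rw [pyGet_neg_one]
      simp
    have halt : flatRef sq v2 1 = if q * q ≤ v2 then [sq] else [] := by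
      unfold flatRef
      rw [if_pos rfl, hparse]
    rw [show (3:Int) - 2 = 1 from by norm_num, hrange, halt, hodd3]
    simp only [List.map_cons, List.map_nil, List.filter, hq, hdig, hw]
    by_cases hc : q * q ≤ v2
    · rw [if_pos hc, decide_eq_true (by linarith : 2 * o * o + (2 * q * q + 0) - q * q ≤ v)]
      simp only [List.map_cons, List.map_nil]
      rw [hdig, strOf_single s sq q hq0 hq4 htos]
    · rw [if_neg hc, decide_eq_false (by intro h; exact hc (by linarith) :
        ¬ (2 * o * o + (2 * q * q + 0) - q * q ≤ v))]
      rfl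
  · -- 4 ≤ m
    have h4 : 4 ≤ m := by omega
    have hoddk : (PySem.Int.mod m 2 == 1) = true → 1 ≤ k := by
      intro h
      rw [PySem.Int.mod_eq_emod_of_pos (by norm_num)] at h
      simp only [beq_iff_eq] at h
      omega
    rw [altNF sq v2 (m - 2) (by omega)]
    have hik : (PySem.Int.floordiv (m - 2 - 1) 2).toNat = k := by
      rw [PySem.Int.floordiv_eq_ediv_of_pos (by norm_num)]
      omega
    rw [hik, hparse, ← hoddm]
    rw [List.filter_map, List.map_map, List.map_map]
    have hne : ∀ r : Int, digitsOf k r ≠ [] ∨ (PySem.Int.mod m 2 == 1) = false := by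
      intro r
      by_cases hodd : (PySem.Int.mod m 2 == 1) = true
      · left
        have := digitsOf_len k r
        have hk1 := hoddk hodd
        intro hnil
        rw [hnil] at this
        simp at this
        omega
      · right
        simpa using hodd
    have hfil : (PySem.List.pyRange 0 ((4 : Int) ^ k) 1).filter
          ((fun code => decide (wOf (PySem.Int.mod m 2 == 1) o (digitsOf (k + 1) code) ≤ v)) ∘
            (fun r => q * 4 ^ k + r)) =
        (PySem.List.pyRange 0 ((4 : Int) ^ k) 1).filter
          (fun r => decide (wOf (PySem.Int.mod m 2 == 1) q (digitsOf k r) ≤ v2)) := by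
      apply List.filter_congr
      intro r hr
      have hb := PySem.List.mem_pyRange_one.mp hr
      simp only [Function.comp_apply]
      rw [digitsOf_split k q r hq0 hq4 hb.1 hb.2]
      rw [wOf_cons _ o q _ (hne r)]
      apply decide_eq_decide.mpr
      constructor <;> intro h <;> linarith
    rw [hfil]
    apply List.map_congr_left
    intro r hr
    have hr' : r ∈ PySem.List.pyRange 0 ((4 : Int) ^ k) 1 := (List.mem_filter.mp hr).1
    have hb := PySem.List.mem_pyRange_one.mp hr'
    simp only [Function.comp_apply]
    rw [digitsOf_split k q r hq0 hq4 hb.1 hb.2]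
    rw [strOf_cons _ s sq q (digitsOf k r) (digitsOf_mem k r) hq0 hq4
      (fun ho => (hne r).resolve_right (by simp only [ho]; decide)) htos]

theorem alt_decomp (s : String) (v m : Int) (h3 : 3 ≤ m) :
    flatRef s v m =
      if v - 2 * pyIntOf s ^ 2 < 0 then []
      else
        ((flatRef "0" (v - 2 * pyIntOf s ^ 2) (m - 2)).map (fun t => s ++ t ++ s)) ++
        ((flatRef "1" (v - 2 * pyIntOf s ^ 2) (m - 2)).map (fun t => s ++ t ++ s)) ++
        ((flatRef "2" (v - 2 * pyIntOf s ^ 2) (m - 2)).map (fun t => s ++ t ++ s)) ++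
        ((flatRef "3" (v - 2 * pyIntOf s ^ 2) (m - 2)).map (fun t => s ++ t ++ s)) := by
  have hne1 : ¬ m = 1 := by omega
  have hpow : pyIntOf s ^ 2 = pyIntOf s * pyIntOf s := sq (pyIntOf s)
  have hk : (PySem.Int.floordiv (m - 1) 2).toNat = ((m - 3) / 2).toNat + 1 := by
    rw [PySem.Int.floordiv_eq_ediv_of_pos (by norm_num)]
    omega
  rw [altNF s v m hne1, hk]
  by_cases hv : v - 2 * pyIntOf s ^ 2 < 0
  · rw [if_pos hv]
    have hnil : (PySem.List.pyRange 0 ((4 : Int) ^ (((m - 3) / 2).toNat + 1)) 1).filter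
        (fun code => decide (wOf (PySem.Int.mod m 2 == 1) (pyIntOf s)
          (digitsOf (((m - 3) / 2).toNat + 1) code) ≤ v)) = [] := by
      apply List.filter_eq_nil_iff.mpr
      intro a _
      have hge := wOf_ge (PySem.Int.mod m 2 == 1) (pyIntOf s) (digitsOf (((m - 3) / 2).toNat + 1) a)
      simp only [decide_eq_true_eq]
      intro hle
      nlinarith
    rw [hnil]
    rfl
  · rw [if_neg hv, range_base4, List.filter_flatMap, List.map_flatMap]
    have hv2 : v - 2 * pyIntOf s ^ 2 = v - 2 * pyIntOf s * pyIntOf s := by rw [hpow]; ring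
    have e0 := chunk_eq s "0" 0 (pyIntOf s) v (v - 2 * pyIntOf s ^ 2) m (((m - 3) / 2).toNat)
      (by norm_num) (by norm_num) (by decide) (by decide) h3 rfl (by linarith [hv2])
    have e1 := chunk_eq s "1" 1 (pyIntOf s) v (v - 2 * pyIntOf s ^ 2) m (((m - 3) / 2).toNat)
      (by norm_num) (by norm_num) (by decide) (by decide) h3 rfl (by linarith [hv2])
    have e2 := chunk_eq s "2" 2 (pyIntOf s) v (v - 2 * pyIntOf s ^ 2) m (((m - 3) / 2).toNat)
      (by norm_num) (by norm_num) (by decide) (by decide) h3 rfl (by linarith [hv2])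
    have e3 := chunk_eq s "3" 3 (pyIntOf s) v (v - 2 * pyIntOf s ^ 2) m (((m - 3) / 2).toNat)
      (by norm_num) (by norm_num) (by decide) (by decide) h3 rfl (by linarith [hv2])
    simp only [List.flatMap_cons, List.flatMap_nil, List.append_nil]
    rw [e0, e1, e2, e3]
    simp [List.append_assoc]

theorem base1 (fuel : Nat) (s : String) (v : Int) : dfsAux fuel s v 1 = flatRef s v 1 := by
  have hpow : pyIntOf s ^ 2 = pyIntOf s * pyIntOf s := sq (pyIntOf s)
  unfold dfsAux flatRef
  norm_num
  by_cases h : v < pyIntOf s ^ 2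
  · rw [if_pos h, if_neg (by intro hle; nlinarith)]
  · rw [if_neg h, if_pos (by nlinarith)]

theorem base2 (fuel : Nat) (s : String) (v : Int) : dfsAux fuel s v 2 = flatRef s v 2 := by
  have hpow : pyIntOf s ^ 2 = pyIntOf s * pyIntOf s := sq (pyIntOf s)
  have hA : dfsAux fuel s v 2 = if v - 2 * pyIntOf s ^ 2 < 0 then [] else [s ++ s] := by
    unfold dfsAux
    norm_num
  rw [hA, altNF s v 2 (by norm_num)]
  have hk : (PySem.Int.floordiv (2 - 1) 2).toNat = 0 := by decide
  rw [hk]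
  have hrange : PySem.List.pyRange 0 ((4 : Int) ^ 0) 1 = [0] := by decide
  have hodd : (PySem.Int.mod 2 2 == 1) = false := by decide
  have hdig : digitsOf 0 0 = ([] : List Int) := rfl
  have hw : wOf false (pyIntOf s) [] = 2 * pyIntOf s * pyIntOf s := by simp [wOf]
  rw [hrange, hodd]
  simp only [List.filter, hdig, hw]
  by_cases h : v - 2 * pyIntOf s ^ 2 < 0
  · rw [if_pos h, decide_eq_false (by intro hle; nlinarith : ¬ 2 * pyIntOf s * pyIntOf s ≤ v)]
    rfl
  · rw [if_neg h, decide_eq_true (by nlinarith : 2 * pyIntOf s * pyIntOf s ≤ v)]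
    simp only [List.map_cons, List.map_nil]
    rw [hdig, strOf_nil]

theorem dfs_main : ∀ (fuel : Nat) (s : String) (v m : Int),
    1 ≤ m → m ≤ 2 * (fuel : Int) + 2 → (PySem.Int.ofStr? s).isSome = true →
    dfsAux fuel s v m = flatRef s v m := by
  intro fuel
  induction fuel with
  | zero =>
    intro s v m h1 h2 _
    have : m = 1 ∨ m = 2 := by norm_num at h2; omega
    rcases this with rfl | rfl
    · exact base1 0 s v
    · exact base2 0 s v
  | succ f ih =>
    intro s v m h1 h2 _
    by_cases hm2 : m ≤ 2
    · have : m = 1 ∨ m = 2 := by omega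
      rcases this with rfl | rfl
      · exact base1 _ s v
      · exact base2 _ s v
    · have h3 : 3 ≤ m := by omega
      have hA : dfsAux (f + 1) s v m =
          if v - 2 * pyIntOf s ^ 2 < 0 then []
          else
            ((dfsAux f "0" (v - 2 * pyIntOf s ^ 2) (m - 2)).map (fun t => s ++ t ++ s)) ++
            ((dfsAux f "1" (v - 2 * pyIntOf s ^ 2) (m - 2)).map (fun t => s ++ t ++ s)) ++
            ((dfsAux f "2" (v - 2 * pyIntOf s ^ 2) (m - 2)).map (fun t => s ++ t ++ s)) ++
            ((dfsAux f "3" (v - 2 * pyIntOf s ^ 2) (m - 2)).map (fun t => s ++ t ++ s)) := by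
        conv_lhs => unfold dfsAux
        rw [if_neg (show ¬ (m = 2) by omega), if_neg (show ¬ (m = 1) by omega)]
      rw [hA, ih "0" _ (m - 2) (by omega) (by push_cast at h2; omega) (by decide),
        ih "1" _ (m - 2) (by omega) (by push_cast at h2; omega) (by decide),
        ih "2" _ (m - 2) (by omega) (by push_cast at h2; omega) (by decide),
        ih "3" _ (m - 2) (by omega) (by push_cast at h2; omega) (by decide),
        ← alt_decomp s v m h3]

-- ===== B-side lemmas =====

def costOf (ds : List Int) : Int := (ds.map (fun d => 2 * d * d)).sum

def midStrOf (ds : List Int) : String := PySem.Str.join "" (ds.map PySem.Int.toStr)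

theorem decode_concat (j : Nat) (q c : Int) (hq : 0 ≤ q) (hc0 : 0 ≤ c) (hc4 : c < 4) :
    decodeLoop (j + 1) (4 * q + c) = c :: decodeLoop j q := by
  show PySem.Int.mod (4 * q + c) 4 :: decodeLoop j (PySem.Int.floordiv (4 * q + c) 4) = _
  rw [PySem.Int.mod_eq_emod_of_pos (by norm_num), PySem.Int.floordiv_eq_ediv_of_pos (by norm_num)]
  have h1 : (4 * q + c) % 4 = c := by omega
  have h2 : (4 * q + c) / 4 = q := by omega
  rw [h1, h2]

theorem digitsOf_concat (j : Nat) (q c : Int) (hq : 0 ≤ q) (hc0 : 0 ≤ c) (hc4 : c < 4) :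
    digitsOf (j + 1) (4 * q + c) = digitsOf j q ++ [c] := by
  unfold digitsOf
  rw [decode_concat j q c hq hc0 hc4, List.reverse_cons]

theorem costOf_concat (ds : List Int) (c : Int) : costOf (ds ++ [c]) = costOf ds + 2 * c * c := by
  simp [costOf]

theorem midStr_concat (ds : List Int) (c : Int) (hds : ∀ d ∈ ds, 0 ≤ d ∧ d < 4)
    (hc0 : 0 ≤ c) (hc4 : c < 4) :
    midStrOf (ds ++ [c]) = midStrOf ds ++ PySem.Int.toStr c := by
  apply String.toList_inj.mp
  have hall : ∀ d ∈ ds ++ [c], 0 ≤ d ∧ d < 4 := by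
    intro d hd
    rcases List.mem_append.mp hd with h | h
    · exact hds d h
    · simp at h; subst h; exact ⟨hc0, hc4⟩
  rw [String.toList_append]
  unfold midStrOf
  rw [midList _ hall, midList _ hds, PySem.Int.toList_toStr, toChars_digit c hc0 hc4]
  simp

theorem wOf_concat (odd : Bool) (o : Int) (ds : List Int) (c : Int) :
    wOf odd o (ds ++ [c]) =
      2 * o * o + costOf ds + 2 * c * c - (if odd then c * c else 0) := by
  unfold wOf costOf
  rw [pyGet_neg_one, List.getLast?_concat]
  cases odd with
  | false => simp; ring
  | true => simp; ring

theorem strOf_concat (odd : Bool) (s : String) (ds : List Int) (c : Int)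
    (hds : ∀ d ∈ ds, 0 ≤ d ∧ d < 4) (hc0 : 0 ≤ c) (hc4 : c < 4) :
    strOf odd s (ds ++ [c]) =
      s ++ midStrOf ds ++
        (if odd then PySem.Int.toStr c else PySem.Int.toStr c ++ PySem.Int.toStr c) ++
        (PySem.Str.slice? (midStrOf ds) none none (-1)).getD "" ++ s := by
  apply String.toList_inj.mp
  have hall : ∀ d ∈ ds ++ [c], 0 ≤ d ∧ d < 4 := by
    intro d hd
    rcases List.mem_append.mp hd with h | h
    · exact hds d h
    · simp at h; subst h; exact ⟨hc0, hc4⟩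
  have htc : (PySem.Int.toStr c).toList = [charOf c] := by
    rw [PySem.Int.toList_toStr]; exact toChars_digit c hc0 hc4
  unfold strOf midStrOf
  cases odd with
  | false =>
    simp only [Bool.false_eq_true, if_false, PySem.Str.slice?_none_none_neg_one,
      Option.getD_some, String.toList_append, String.toList_ofList]
    rw [midList _ hall, midList _ hds, htc]
    simp
  | true =>
    simp only [if_true, PySem.Str.slice?_none_none_neg_one, Option.getD_some,
      String.toList_append, String.toList_ofList, PySem.Str.toList_slice]
    rw [PySem.Chars.slice_eq_listSlice, midList _ hall, midList _ hds,
      PySem.List.slice_to_neg_one, htc]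
    simp [List.dropLast_concat]

theorem flatMap_filter_eq {α β : Type} (l : List α) (F : α → Bool) (g : α → List β)
    (h : ∀ x ∈ l, F x = false → g x = []) :
    (l.filter F).flatMap g = l.flatMap g := by
  induction l with
  | nil => rfl
  | cons x t ih =>
    by_cases hx : F x = true
    · rw [List.filter_cons_of_pos hx, List.flatMap_cons, List.flatMap_cons,
        ih (fun y hy hf => h y (List.mem_cons_of_mem x hy) hf)]
    · have hx' : F x = false := by simpa using hx
      rw [List.filter_cons_of_neg (by simp [hx']), List.flatMap_cons,
        h x (List.mem_cons_self) hx',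
        ih (fun y hy hf => h y (List.mem_cons_of_mem x hy) hf)]
      rfl

theorem range_split4 (n : Nat) :
    PySem.List.pyRange 0 (4 * (n : Int)) 1 =
      (PySem.List.pyRange 0 (n : Int) 1).flatMap
        (fun q => (PySem.List.pyRange 0 4 1).map (fun c => 4 * q + c)) := by
  induction n with
  | zero => decide
  | succ n ih =>
    have e1 : (4 : Int) * ((n : Int) + 1) = 4 * n + 4 := by ring
    have h04 : PySem.List.pyRange (4 * (n : Int)) (4 * (n : Int) + 4) 1 =
        [4 * (n : Int), 4 * n + 1, 4 * n + 2, 4 * n + 3] := by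
      rw [PySem.List.pyRange_one]
      have h : ((4 * (n : Int) + 4) - 4 * n).toNat = 4 := by omega
      rw [h, show List.range 4 = [0, 1, 2, 3] from by decide]
      norm_num
    have h04' : (PySem.List.pyRange 0 4 1).map (fun c => 4 * (n : Int) + c) =
        [4 * (n : Int), 4 * n + 1, 4 * n + 2, 4 * n + 3] := by
      rw [show PySem.List.pyRange 0 4 1 = [0, 1, 2, 3] from by decide]
      norm_num
    push_cast
    rw [e1, PySem.List.pyRange_one_append 0 (4 * n) (4 * n + 4) (by positivity) (by omega),
      PySem.List.pyRange_one_succ_right (a := 0) (b := n) (by positivity), ih,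
      List.flatMap_append, h04]
    simp only [List.flatMap_cons, List.flatMap_nil, List.append_nil, h04']

theorem range_mul4 (k : Nat) :
    PySem.List.pyRange 0 ((4 : Int) ^ (k + 1)) 1 =
      (PySem.List.pyRange 0 ((4 : Int) ^ k) 1).flatMap
        (fun q => (PySem.List.pyRange 0 4 1).map (fun c => 4 * q + c)) := by
  have e : (4 : Int) ^ (k + 1) = 4 * ((4 ^ k : Nat) : Int) := by push_cast; ring
  have e2 : (4 : Int) ^ k = ((4 ^ k : Nat) : Int) := by push_cast; ring
  rw [e, e2, range_split4 (4 ^ k)]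

theorem levelIter_succ_out (j : Nat) (L : List (String × Int)) :
    levelIter (j + 1) L = levelOnce (levelIter j L) := by
  induction j generalizing L with
  | zero => rfl
  | succ j ih =>
    show levelIter (j + 1) (levelOnce L) = _
    rw [ih (levelOnce L)]
    rfl

theorem midStrOf_nil : midStrOf [] = "" := by
  unfold midStrOf
  apply String.toList_inj.mp
  rw [midList [] (by simp)]
  rfl


theorem flatMap_congr_mem {α β : Type} (l : List α) (f g : α → List β)
    (h : ∀ x ∈ l, f x = g x) : l.flatMap f = l.flatMap g := by
  simp only [List.flatMap_def]
  rw [List.map_congr_left h]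

theorem states_char (j : Nat) (b : Int) (hb : 0 ≤ b) :
    levelIter j [("", b)] =
      ((PySem.List.pyRange 0 ((4 : Int) ^ j) 1).filter
          (fun q => decide (b - costOf (digitsOf j q) ≥ 0))).map
        (fun q => (midStrOf (digitsOf j q), b - costOf (digitsOf j q))) := by
  induction j with
  | zero =>
    show [("", b)] = _
    rw [show PySem.List.pyRange 0 ((4 : Int) ^ 0) 1 = [0] from by decide]
    have hd : digitsOf 0 0 = ([] : List Int) := rfl
    simp only [List.filter, hd]
    rw [decide_eq_true (by simp [costOf]; omega : b - costOf ([] : List Int) ≥ 0)]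
    simp only [List.map_cons, List.map_nil]
    rw [hd]
    simp [midStrOf_nil, costOf]
  | succ j ih =>
    rw [levelIter_succ_out, ih]
    unfold levelOnce
    rw [List.flatMap_map]
    have habs : ∀ q ∈ PySem.List.pyRange 0 ((4 : Int) ^ j) 1,
        (fun q => decide (b - costOf (digitsOf j q) ≥ 0)) q = false →
        (fun q => ((PySem.List.pyRange 0 4 1).filter
            (fun c => decide ((midStrOf (digitsOf j q), b - costOf (digitsOf j q)).2 - 2 * c * c ≥ 0))).map
          (fun c => ((midStrOf (digitsOf j q), b - costOf (digitsOf j q)).1 ++ PySem.Int.toStr c,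
            (midStrOf (digitsOf j q), b - costOf (digitsOf j q)).2 - 2 * c * c))) q = [] := by
      intro q _ hq
      simp only [decide_eq_false_iff_not, not_le] at hq
      have : (PySem.List.pyRange 0 4 1).filter
          (fun c => decide (b - costOf (digitsOf j q) - 2 * c * c ≥ 0)) = [] := by
        apply List.filter_eq_nil_iff.mpr
        intro c _
        simp only [decide_eq_true_eq]
        intro hcon
        nlinarith [mul_self_nonneg c]
      simp only [this, List.map_nil]
    rw [flatMap_filter_eq _ _ _ habs, range_mul4 j, List.filter_flatMap, List.map_flatMap]
    apply flatMap_congr_mem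
    intro q hq
    have hqb := PySem.List.mem_pyRange_one.mp hq
    rw [List.filter_map, List.map_map]
    have hdig : ∀ c : Int, c ∈ PySem.List.pyRange 0 4 1 →
        digitsOf (j + 1) (4 * q + c) = digitsOf j q ++ [c] := by
      intro c hc
      have hcb := PySem.List.mem_pyRange_one.mp hc
      exact digitsOf_concat j q c hqb.1 hcb.1 hcb.2
    have hfil2 : (PySem.List.pyRange 0 4 1).filter
          ((fun code => decide (b - costOf (digitsOf (j + 1) code) ≥ 0)) ∘ (fun c => 4 * q + c)) =
        (PySem.List.pyRange 0 4 1).filter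
          (fun c => decide (b - costOf (digitsOf j q) - 2 * c * c ≥ 0)) := by
      apply List.filter_congr
      intro c hc
      simp only [Function.comp_apply]
      rw [hdig c hc, costOf_concat]
      apply decide_eq_decide.mpr
      constructor <;> intro <;> linarith
    rw [hfil2]
    apply List.map_congr_left
    intro c hc
    have hc' : c ∈ PySem.List.pyRange 0 4 1 := (List.mem_filter.mp hc).1
    have hcb := PySem.List.mem_pyRange_one.mp hc'
    simp only [Function.comp_apply]
    rw [hdig c hc', costOf_concat,
      midStr_concat (digitsOf j q) c (digitsOf_mem j q) hcb.1 hcb.2]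
    simp only [Prod.mk.injEq]
    constructor
    · trivial
    · ring


theorem alt_emit (s : String) (v m : Int) (hm1 : ¬ m = 1)
    (hb : ¬ v - 2 * pyIntOf s * pyIntOf s < 0) (hm2 : ¬ m = 2) :
    dfs_alt s v m =
      (levelIter (PySem.Int.floordiv (m - 3) 2).toNat
          [("", v - 2 * pyIntOf s * pyIntOf s)]).flatMap
        (fun st => ((PySem.List.pyRange 0 4 1).filter
            (fun c => decide ((if (PySem.Int.mod m 2 == 1) = true then c * c else 2 * c * c) ≤ st.2))).map
          (fun c => s ++ st.1 ++
            (if (PySem.Int.mod m 2 == 1) = true then PySem.Int.toStr c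
             else PySem.Int.toStr c ++ PySem.Int.toStr c) ++
            (PySem.Str.slice? st.1 none none (-1)).getD "" ++ s)) := by
  unfold dfs_alt
  rw [if_neg hm1]
  show (if v - 2 * pyIntOf s * pyIntOf s < 0 then [] else
    if m = 2 then [s ++ s] else
    (levelIter (PySem.Int.floordiv (m - 3) 2).toNat
        [("", v - 2 * pyIntOf s * pyIntOf s)]).foldl (fun out st =>
      (PySem.List.pyRange 0 4 1).foldl (fun out c =>
        if (if (PySem.Int.mod m 2 == 1) = true then c * c else 2 * c * c) ≤ st.2 then
          out ++ [s ++ st.1 ++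
            (if (PySem.Int.mod m 2 == 1) = true then PySem.Int.toStr c
             else PySem.Int.toStr c ++ PySem.Int.toStr c) ++
            (PySem.Str.slice? st.1 none none (-1)).getD "" ++ s]
        else out) out) []) = _
  rw [if_neg hb, if_neg hm2]
  have hinner : (fun (out : List String) (st : String × Int) =>
      (PySem.List.pyRange 0 4 1).foldl (fun out c =>
        if (if (PySem.Int.mod m 2 == 1) = true then c * c else 2 * c * c) ≤ st.2 then
          out ++ [s ++ st.1 ++
            (if (PySem.Int.mod m 2 == 1) = true then PySem.Int.toStr c
             else PySem.Int.toStr c ++ PySem.Int.toStr c) ++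
            (PySem.Str.slice? st.1 none none (-1)).getD "" ++ s]
        else out) out) =
      (fun (out : List String) (st : String × Int) => out ++
        ((PySem.List.pyRange 0 4 1).filter
            (fun c => decide ((if (PySem.Int.mod m 2 == 1) = true then c * c else 2 * c * c) ≤ st.2))).map
          (fun c => s ++ st.1 ++
            (if (PySem.Int.mod m 2 == 1) = true then PySem.Int.toStr c
             else PySem.Int.toStr c ++ PySem.Int.toStr c) ++
            (PySem.Str.slice? st.1 none none (-1)).getD "" ++ s)) := by
    funext out st
    exact PySem.List.foldl_append_ite
      (p := fun c => (if (PySem.Int.mod m 2 == 1) = true then c * c else 2 * c * c) ≤ st.2)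
      (f := fun c => s ++ st.1 ++
        (if (PySem.Int.mod m 2 == 1) = true then PySem.Int.toStr c
         else PySem.Int.toStr c ++ PySem.Int.toStr c) ++
        (PySem.Str.slice? st.1 none none (-1)).getD "" ++ s) _ _
  rw [hinner, PySem.List.foldl_append_eq_flatMap]
  rw [List.nil_append]

theorem flatRef_nil (s : String) (v m : Int) (hm1 : ¬ m = 1)
    (hv : v < 2 * pyIntOf s * pyIntOf s) : flatRef s v m = [] := by
  rw [altNF s v m hm1]
  have hnil : (PySem.List.pyRange 0 ((4 : Int) ^ (PySem.Int.floordiv (m - 1) 2).toNat) 1).filter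
      (fun code => decide (wOf (PySem.Int.mod m 2 == 1) (pyIntOf s)
        (digitsOf (PySem.Int.floordiv (m - 1) 2).toNat code) ≤ v)) = [] := by
    apply List.filter_eq_nil_iff.mpr
    intro a _
    have hge := wOf_ge (PySem.Int.mod m 2 == 1) (pyIntOf s)
      (digitsOf (PySem.Int.floordiv (m - 1) 2).toNat a)
    simp only [decide_eq_true_eq]
    intro hle
    linarith
  rw [hnil]
  rfl

theorem flatRef_two (s : String) (v : Int) (hb : ¬ v - 2 * pyIntOf s * pyIntOf s < 0) :
    flatRef s v 2 = [s ++ s] := by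
  rw [altNF s v 2 (by norm_num)]
  have hk : (PySem.Int.floordiv (2 - 1) 2).toNat = 0 := by decide
  rw [hk]
  have hrange : PySem.List.pyRange 0 ((4 : Int) ^ 0) 1 = [0] := by decide
  have hodd : (PySem.Int.mod 2 2 == 1) = false := by decide
  have hdig : digitsOf 0 0 = ([] : List Int) := rfl
  have hw : wOf false (pyIntOf s) [] = 2 * pyIntOf s * pyIntOf s := by simp [wOf]
  rw [hrange, hodd]
  simp only [List.filter, hdig, hw]
  rw [decide_eq_true (by linarith : 2 * pyIntOf s * pyIntOf s ≤ v)]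
  simp only [List.map_cons, List.map_nil]
  rw [hdig, strOf_nil]

theorem alt_eq_flatRef (s : String) (v m : Int) (h1 : 1 ≤ m) :
    dfs_alt s v m = flatRef s v m := by
  by_cases hm1 : m = 1
  · subst hm1
    unfold dfs_alt flatRef
    rfl
  by_cases hb : v - 2 * pyIntOf s * pyIntOf s < 0
  · have hA : dfs_alt s v m = [] := by
      unfold dfs_alt
      rw [if_neg hm1]
      show (if v - 2 * pyIntOf s * pyIntOf s < 0 then [] else _) = _
      rw [if_pos hb]
    rw [hA, flatRef_nil s v m hm1 (by linarith)]
  by_cases hm2 : m = 2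
  · subst hm2
    have hA : dfs_alt s v 2 = [s ++ s] := by
      unfold dfs_alt
      rw [if_neg hm1]
      show (if v - 2 * pyIntOf s * pyIntOf s < 0 then [] else
        if (2 : Int) = 2 then [s ++ s] else _) = _
      rw [if_neg hb, if_pos rfl]
    rw [hA, flatRef_two s v hb]
  · have h3 : 3 ≤ m := by omega
    have hb' : 0 ≤ v - 2 * pyIntOf s * pyIntOf s := by linarith [not_lt.mp hb]
    have hk : (PySem.Int.floordiv (m - 1) 2).toNat = (PySem.Int.floordiv (m - 3) 2).toNat + 1 := by
      rw [PySem.Int.floordiv_eq_ediv_of_pos (by norm_num),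
        PySem.Int.floordiv_eq_ediv_of_pos (by norm_num)]
      omega
    rw [alt_emit s v m hm1 hb hm2, states_char _ _ hb', altNF s v m hm1, hk,
      range_mul4, List.filter_flatMap, List.map_flatMap, List.flatMap_map]
    set j := (PySem.Int.floordiv (m - 3) 2).toNat with hj
    set b := v - 2 * pyIntOf s * pyIntOf s with hbdef
    rw [flatMap_filter_eq _ _ _ (by
      intro q _ hq
      simp only [decide_eq_false_iff_not, not_le] at hq
      have : (PySem.List.pyRange 0 4 1).filter
          (fun c => decide ((if (PySem.Int.mod m 2 == 1) = true then c * c else 2 * c * c) ≤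
            (midStrOf (digitsOf j q), b - costOf (digitsOf j q)).2)) = [] := by
        apply List.filter_eq_nil_iff.mpr
        intro c _
        simp only [decide_eq_true_eq]
        intro hcon
        have h0 : (0 : Int) ≤ (if (PySem.Int.mod m 2 == 1) = true then c * c else 2 * c * c) := by
          split <;> nlinarith [mul_self_nonneg c]
        linarith
      simp only [this, List.map_nil])]
    apply flatMap_congr_mem
    intro q hq
    have hqb := PySem.List.mem_pyRange_one.mp hq
    rw [List.filter_map, List.map_map]
    have hdig : ∀ c : Int, c ∈ PySem.List.pyRange 0 4 1 →
        digitsOf (j + 1) (4 * q + c) = digitsOf j q ++ [c] := by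
      intro c hc
      have hcb := PySem.List.mem_pyRange_one.mp hc
      exact digitsOf_concat j q c hqb.1 hcb.1 hcb.2
    have hfil : (PySem.List.pyRange 0 4 1).filter
          (fun c => decide ((if (PySem.Int.mod m 2 == 1) = true then c * c else 2 * c * c) ≤
            (midStrOf (digitsOf j q), b - costOf (digitsOf j q)).2)) =
        (PySem.List.pyRange 0 4 1).filter
          ((fun code => decide (wOf (PySem.Int.mod m 2 == 1) (pyIntOf s)
            (digitsOf (j + 1) code) ≤ v)) ∘ (fun c => 4 * q + c)) := by
      apply List.filter_congr
      intro c hc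
      simp only [Function.comp_apply]
      rw [hdig c hc, wOf_concat]
      apply decide_eq_decide.mpr
      cases hodd : (PySem.Int.mod m 2 == 1) with
      | false => simp only [Bool.false_eq_true, if_false]
                 constructor <;> intro <;> [linarith; linarith]
      | true => simp only [if_true]
                constructor <;> intro <;> [linarith; linarith]
    rw [hfil]
    apply List.map_congr_left
    intro c hc
    have hc' : c ∈ PySem.List.pyRange 0 4 1 := (List.mem_filter.mp hc).1
    have hcb := PySem.List.mem_pyRange_one.mp hc'
    simp only [Function.comp_apply]
    rw [hdig c hc', strOf_concat _ s (digitsOf j q) c (digitsOf_mem j q) hcb.1 hcb.2]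

-- ===== VERDICT (by name: the statement is the Claim_ definition above) =====
theorem dfs_spec : Claim_equal_dfs := by
  intro s v m _hdom hpre
  unfold Spec_dfs dfs
  by_cases h1 : 1 ≤ m
  · rw [dfs_main m.toNat s v m h1 (by omega) hpre.2]
    exact (alt_eq_flatRef s v m h1).symm
  · -- m ≤ 0 and the budget is already negative: both return []
    have hv : v - 2 * pyIntOf s ^ 2 < 0 := by
      rcases hpre.1 with h | h
      · exact absurd h h1
      · exact h
    have hm0 : m.toNat = 0 := by omega
    have hA : dfsAux m.toNat s v m = [] := by
      rw [hm0]
      unfold dfsAux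
      rw [if_neg (show ¬ m = 2 by omega), if_neg (show ¬ m = 1 by omega)]
    have hB : dfs_alt s v m = [] := by
      unfold dfs_alt
      rw [if_neg (show ¬ m = 1 by omega)]
      show (if v - 2 * pyIntOf s * pyIntOf s < 0 then [] else _) = _
      rw [if_pos (by nlinarith [sq (pyIntOf s)])]
    rw [hA, hB]
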